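-- pv_equiv track=rewrite | github.com/EurekaBram/WordTranslate | main.py | replace_double_cons
-- ===== SOURCE A (Python) =====
-- Vowels = ["a", "e", "i", "o", "u", "y"]
--
-- TranslateChars = ["1", "2", "3", "4", "5", "6"]
--
-- def replace_double_cons(string):
--     result = ""
--     i = 0
--     while i < len(string)-1:
--         if string[i] not in Vowels+TranslateChars and string[i] == string[i + 1]:
--             result += "1"
--             i += 1
--         else:
--             result += string[i]
--         i += 1
--     if i < len(string):
--         result += string[i]
--     return result
-- ===== SOURCE B (Python) =====
-- Vowels = ["a", "e", "i", "o", "u", "y"]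
--
-- TranslateChars = ["1", "2", "3", "4", "5", "6"]
--
-- def replace_double_cons(string):
--     excluded = set(Vowels) | set(TranslateChars)
--     out = []
--     prev = None
--     for c in string:
--         if prev is None:
--             prev = c
--         elif prev == c and prev not in excluded:
--             out.append("1")
--             prev = None
--         else:
--             out.append(prev)
--             prev = c
--     if prev is not None:
--         out.append(prev)
--     return "".join(out)
-- ===== Notes on version B (the rewrite author's own statement) =====
-- stated objective: faster
-- what changed: Replaces A's index-based while loop with skip-by-2 cursor jumps and quadratic string concatenation by a single pass over the characters maintaining a pending-previous-char state, collecting pieces in a list joined once at the end.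
import Mathlib
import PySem

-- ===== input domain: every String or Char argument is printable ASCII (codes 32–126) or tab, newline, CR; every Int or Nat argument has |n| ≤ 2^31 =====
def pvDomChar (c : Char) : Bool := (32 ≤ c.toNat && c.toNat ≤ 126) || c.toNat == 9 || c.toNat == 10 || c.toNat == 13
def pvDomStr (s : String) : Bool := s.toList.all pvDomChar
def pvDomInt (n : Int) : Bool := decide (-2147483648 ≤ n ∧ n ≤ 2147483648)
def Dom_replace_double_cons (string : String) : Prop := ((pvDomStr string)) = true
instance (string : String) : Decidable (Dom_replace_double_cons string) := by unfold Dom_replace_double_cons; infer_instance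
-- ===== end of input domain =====

-- B replaces A's index-jumping while loop by a one-pass fold with a pending previous character (idiomatic single pass; return value only).

-- ===== PORT A =====
-- Vowels + TranslateChars membership test, as in A's `string[i] not in Vowels+TranslateChars`
def pvExcl (c : Char) : Bool :=
  c ∈ ['a', 'e', 'i', 'o', 'u', 'y', '1', '2', '3', '4', '5', '6']

-- the while loop of A: cursor i over the char list, accumulating `result`
def pvLoopA (cs : List Char) (i : Nat) (result : List Char) : List Char :=
  if _h : i + 1 < cs.length then
    if !pvExcl cs[i]! && cs[i]! == cs[i + 1]! then
      pvLoopA cs (i + 2) (result ++ ['1'])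
    else
      pvLoopA cs (i + 1) (result ++ [cs[i]!])
  else if i < cs.length then result ++ [cs[i]!] else result
termination_by cs.length - i

def replace_double_cons (string : String) : String :=
  String.mk (pvLoopA string.toList 0 [])

-- ===== PORT B =====
-- one fold step: state = (output so far, pending previous char)
def pvStepB (st : List Char × Option Char) (c : Char) : List Char × Option Char :=
  match st with
  | (out, none) => (out, some c)
  | (out, some p) =>
      if p == c && !pvExcl p then (out ++ ['1'], none)
      else (out ++ [p], some c)

def replace_double_cons_alt (string : String) : String :=
  String.mk ((string.toList.foldl pvStepB ([], none)).1
    ++ (string.toList.foldl pvStepB ([], none)).2.toList)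

-- ===== PRECONDITION & SPEC =====
def Spec_replace_double_cons (string : String) (out : String) : Prop := out = replace_double_cons_alt string
instance (string : String) (out : String) : Decidable (Spec_replace_double_cons string out) := by unfold Spec_replace_double_cons; infer_instance

-- ===== CLAIM (what is proved, stated in full; the proofs are below) =====
def Claim_equal_replace_double_cons : Prop := ∀ (string : String), Dom_replace_double_cons string → Spec_replace_double_cons string (replace_double_cons string)

-- ===== LEMMAS AND PROOFS =====

-- reference function: what both programs compute on a char list
def pvG : List Char → List Char
  | a :: b :: rest =>
      if !pvExcl a && a == b then '1' :: pvG rest else a :: pvG (b :: rest)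
  | [a] => [a]
  | [] => []

-- pvG applied according to a pending state
def pvGst (st : Option Char) (l : List Char) : List Char :=
  match st with
  | none => pvG l
  | some p => pvG (p :: l)

theorem pvLoopA_eq (cs : List Char) (i : Nat) (result : List Char) :
    pvLoopA cs i result = result ++ pvG (cs.drop i) := by
  rw [pvLoopA]
  split
  · rename_i h
    have hi : i < cs.length := by omega
    have hd1 : cs.drop i = cs[i] :: cs.drop (i + 1) := List.drop_eq_getElem_cons hi
    have hd2 : cs.drop (i + 1) = cs[i+1] :: cs.drop (i + 2) := List.drop_eq_getElem_cons h
    have e1 : cs[i]! = cs[i] := getElem!_pos cs i hi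
    have e2 : cs[i+1]! = cs[i+1] := getElem!_pos cs (i+1) h
    rw [e1, e2]
    split
    · rename_i hc
      rw [pvLoopA_eq cs (i + 2), hd1, hd2, pvG, if_pos hc]
      simp
    · rename_i hc
      rw [pvLoopA_eq cs (i + 1), hd1, hd2, pvG, if_neg hc, ← hd2]
      simp
  · rename_i h
    split
    · rename_i hi
      have : i + 1 = cs.length := by omega
      have hd1 : cs.drop i = cs[i] :: cs.drop (i + 1) := List.drop_eq_getElem_cons hi
      have hd2 : cs.drop (i + 1) = [] := List.drop_eq_nil_of_le (by omega)
      have e1 : cs[i]! = cs[i] := getElem!_pos cs i hi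
      rw [hd1, hd2, pvG, e1]
    · rename_i hi
      have : cs.drop i = [] := List.drop_eq_nil_of_le (by omega)
      rw [this, pvG]; simp
termination_by cs.length - i

theorem pvFoldB_eq (l : List Char) : ∀ (out : List Char) (st : Option Char),
    (l.foldl pvStepB (out, st)).1 ++ (l.foldl pvStepB (out, st)).2.toList
      = out ++ pvGst st l := by
  induction l with
  | nil =>
      intro out st
      cases st <;> simp [pvGst, pvG]
  | cons c t ih =>
      intro out st
      cases st with
      | none =>
          simpa [pvStepB, pvGst] using ih out (some c)
      | some p =>
          simp only [List.foldl_cons, pvStepB]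
          by_cases hc : (p == c && !pvExcl p) = true
          · rw [if_pos hc]
            rw [ih (out ++ ['1']) none]
            simp only [pvGst, pvG]
            have : (!pvExcl p && p == c) = true := by
              simp at hc ⊢; exact ⟨hc.2, hc.1⟩
            rw [if_pos this]; simp
          · rw [if_neg hc]
            rw [ih (out ++ [p]) (some c)]
            simp only [pvGst, pvG]
            rw [if_neg]
            · simp
            · intro h; apply hc; simp at h ⊢; exact ⟨h.2, h.1⟩
  
-- ===== VERDICT (by name: the statement is the Claim_ definition above) =====
theorem replace_double_cons_spec : Claim_equal_replace_double_cons := by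
  intro string _
  unfold Spec_replace_double_cons replace_double_cons replace_double_cons_alt
  rw [pvLoopA_eq, pvFoldB_eq]
  simp [pvGst]
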